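-- pv_equiv track=rewrite | github.com/InterWeave-SmartSolutions/creatio-ai-knowledge-hub | scripts/utilities/document_processor.py | clean_text_content
-- ===== SOURCE A (Python) =====
-- def clean_text_content(text: str) -> str:
--     """Clean and format text content for markdown."""
--     # Remove excessive whitespace
--     lines = text.split('\n')
--     cleaned_lines = []
--
--     for line in lines:
--         cleaned_line = line.strip()
--         if cleaned_line:
--             cleaned_lines.append(cleaned_line)
--         elif cleaned_lines and cleaned_lines[-1]:  # Keep single empty lines
--             cleaned_lines.append('')
--
--     return '\n'.join(cleaned_lines)
-- ===== SOURCE B (Python) =====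
-- def _span(lines, blank):
--     """Longest prefix of lines whose blankness equals `blank`, and the remainder."""
--     i = 0
--     while i < len(lines) and (not lines[i]) == blank:
--         i += 1
--     return lines[:i], lines[i:]
--
-- def _collapse(lines, have_content):
--     """Collapse a list of already-stripped lines run by run (recursively)."""
--     if not lines:
--         return []
--     if lines[0]:
--         run, rest = _span(lines, False)
--         return run + _collapse(rest, True)
--     _, rest = _span(lines, True)
--     blank = [''] if have_content else []
--     return blank + _collapse(rest, have_content)
--
-- def clean_text_content(text: str) -> str:
--     """Clean and format text content for markdown (run-based recursion)."""
--     stripped = [line.strip() for line in text.split('\n')]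
--     return '\n'.join(_collapse(stripped, False))
-- ===== Notes on version B (the rewrite author's own statement) =====
-- stated objective: alternative
-- what changed: B first strips all lines, then recursively consumes the list run by run (span of non-blank lines kept whole, span of blank lines collapsed to one '' only after content), instead of A's single forward loop that tests cleaned_lines[-1] before appending a blank.
import Mathlib
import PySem

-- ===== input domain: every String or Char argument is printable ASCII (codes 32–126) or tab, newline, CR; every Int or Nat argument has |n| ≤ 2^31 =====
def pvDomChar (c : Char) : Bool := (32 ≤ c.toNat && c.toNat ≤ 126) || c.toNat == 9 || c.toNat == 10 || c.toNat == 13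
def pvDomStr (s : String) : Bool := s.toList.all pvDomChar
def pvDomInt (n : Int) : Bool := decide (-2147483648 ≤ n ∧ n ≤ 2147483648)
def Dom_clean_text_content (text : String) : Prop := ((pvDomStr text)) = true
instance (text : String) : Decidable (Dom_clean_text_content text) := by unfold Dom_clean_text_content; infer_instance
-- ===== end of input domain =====

-- B strips all lines first, then recurses run by run (a non-blank run is kept whole; a blank run
-- becomes one '' only after content), instead of A's forward loop guarded by cleaned_lines[-1];
-- objective: alternative decomposition, same cost.

-- ===== PORT A =====
def clean_text_content (text : String) : String :=
  let lines := (PySem.Str.split? text "\n").getD []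
  let cleaned := lines.foldl (fun acc line =>
    let c := PySem.Str.strip line
    if c ≠ "" then acc ++ [c]
    -- `elif cleaned_lines and cleaned_lines[-1]`: acc nonempty and its last element truthy
    else if acc.getLast?.getD "" ≠ "" then acc ++ [""]
    else acc) ([] : List String)
  PySem.Str.join "\n" cleaned

-- ===== PORT B =====
/-- Source B's `_span`: longest prefix whose blankness equals `blank`, and the remainder. -/
def pvSpanB (blank : Bool) : List String → List String × List String
  | [] => ([], [])
  | l :: t =>
    if (l == "") = blank then
      let p := pvSpanB blank t
      (l :: p.1, p.2)
    else ([], l :: t)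

/-- Termination fact the port cites: `_span` never lengthens the remainder. -/
lemma pvSpanB_snd_le (b : Bool) (xs : List String) : (pvSpanB b xs).2.length ≤ xs.length := by
  induction xs with
  | nil => simp [pvSpanB]
  | cons l t ih =>
    by_cases h : (l == "") = b
    · simpa [pvSpanB, h] using Nat.le_succ_of_le ih
    · simp [pvSpanB, h]

/-- Source B's `_collapse`: recursion over runs of already-stripped lines. -/
def pvCollapseB (lines : List String) (have_content : Bool) : List String :=
  match lines with
  | [] => []
  | l :: t =>
    if l ≠ "" then
      let p := pvSpanB false (l :: t)
      p.1 ++ pvCollapseB p.2 true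
    else
      let p := pvSpanB true (l :: t)
      (if have_content then [""] else []) ++ pvCollapseB p.2 have_content
termination_by lines.length
decreasing_by
  · have h1 : ((l == "") = false) := by simpa using (by assumption : ¬ l = "")
    simp only [pvSpanB, h1]
    exact Nat.lt_succ_of_le (pvSpanB_snd_le false t)
  · have h1 : ((l == "") = true) := by simpa using (by assumption : ¬ ¬ l = "")
    simp only [pvSpanB, h1]
    exact Nat.lt_succ_of_le (pvSpanB_snd_le true t)

def clean_text_content_alt (text : String) : String :=
  let stripped := ((PySem.Str.split? text "\n").getD []).map PySem.Str.strip
  PySem.Str.join "\n" (pvCollapseB stripped false)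

-- ===== PRECONDITION & SPEC =====
def Spec_clean_text_content (text : String) (out : String) : Prop := out = clean_text_content_alt text
instance (text : String) (out : String) : Decidable (Spec_clean_text_content text out) := by unfold Spec_clean_text_content; infer_instance

-- ===== CLAIM (what is proved, stated in full; the proofs are below) =====
def Claim_equal_clean_text_content : Prop := ∀ (text : String), Dom_clean_text_content text → Spec_clean_text_content text (clean_text_content text)

-- ===== LEMMAS AND PROOFS =====

/-- A's loop, recursively, keyed on the "a blank may be appended" flag (= last appended truthy). -/
def pvG : Bool → List String → List String
  | _, [] => []
  | b, l :: t =>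
    if PySem.Str.strip l ≠ "" then PySem.Str.strip l :: pvG true t
    else if b then "" :: pvG false t else pvG false t

lemma foldlA_eq_pvG (ls : List String) : ∀ acc : List String,
    ls.foldl (fun acc line =>
      let c := PySem.Str.strip line
      if c ≠ "" then acc ++ [c]
      else if acc.getLast?.getD "" ≠ "" then acc ++ [""]
      else acc) acc = acc ++ pvG (acc.getLast?.getD "" ≠ "") ls := by
  induction ls with
  | nil => intro acc; simp [pvG]
  | cons l t ih =>
    intro acc
    simp only [List.foldl_cons]
    by_cases hc : PySem.Str.strip l = ""
    · rw [hc]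
      by_cases hb : acc.getLast?.getD "" ≠ ""
      · rw [if_neg (by simp), if_pos hb, ih]
        simp [pvG, hc, hb, List.append_assoc]
      · rw [if_neg (by simp), if_neg hb, ih]
        simp [pvG, hc, hb]
    · rw [if_pos hc, ih]
      simp [pvG, hc, List.append_assoc]

/-- `pvG false` skips leading blanks, then behaves as `pvG true`. -/
lemma pvG_false_dropWhile (t : List String) :
    pvG false t = pvG true (t.dropWhile (fun l => PySem.Str.strip l == "")) := by
  induction t with
  | nil => simp [pvG]
  | cons l u ih =>
    by_cases h : PySem.Str.strip l = ""
    · simp [pvG, h, ih]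
    · simp [pvG, h]

/-- Re-collapsing the remainder of a non-blank span reproduces the whole collapse. -/
lemma pvSpanB_false_recombine (t : List String) :
    (pvSpanB false t).1 ++ pvCollapseB (pvSpanB false t).2 true = pvCollapseB t true := by
  cases t with
  | nil => simp [pvSpanB, pvCollapseB]
  | cons m u =>
    by_cases hm : m = ""
    · subst hm
      simp [pvSpanB]
    · conv_rhs => rw [pvCollapseB]
      rw [if_pos hm]

/-- Peeling one non-blank line off a B-run. -/
lemma pvCollapseB_cons_nonblank (s : String) (t : List String) (hs : s ≠ "") (b : Bool) :
    pvCollapseB (s :: t) b = s :: pvCollapseB t true := by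
  rw [pvCollapseB, if_pos hs]
  have hspan : pvSpanB false (s :: t) = (s :: (pvSpanB false t).1, (pvSpanB false t).2) := by
    simp [pvSpanB, hs]
  rw [hspan]
  simp only [List.cons_append]
  rw [pvSpanB_false_recombine]

/-- Peeling the leading blank line off B; the rest of its blank run is consumed by the span. -/
lemma pvCollapseB_cons_blank (t : List String) (b : Bool) :
    pvCollapseB ("" :: t) b
      = (if b then [""] else []) ++ pvCollapseB (pvSpanB true t).2 b := by
  rw [pvCollapseB, if_neg (by simp)]
  have hspan : pvSpanB true (("" : String) :: t) = ("" :: (pvSpanB true t).1, (pvSpanB true t).2) := by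
    simp [pvSpanB]
  rw [hspan]

/-- The blank span on stripped lines is the strip-image of the blank prefix drop. -/
lemma pvSpanB_snd_map_strip (t : List String) :
    (pvSpanB true (t.map PySem.Str.strip)).2
      = (t.dropWhile (fun l => PySem.Str.strip l == "")).map PySem.Str.strip := by
  induction t with
  | nil => simp [pvSpanB]
  | cons l u ih =>
    by_cases h : PySem.Str.strip l = ""
    · simp [pvSpanB, h, ih]
    · simp [pvSpanB, h]

/-- The flag is irrelevant when the list does not start with a blank line. -/
lemma pvCollapseB_flag (x : List String) (h : x.head? ≠ some "") :
    pvCollapseB x false = pvCollapseB x true := by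
  cases x with
  | nil => simp [pvCollapseB]
  | cons l t =>
    have hl : l ≠ "" := by intro he; exact h (by simp [he])
    rw [pvCollapseB, pvCollapseB]
    simp [hl]

lemma dropWhile_head_nonblank (t : List String) :
    ((t.dropWhile (fun l => PySem.Str.strip l == "")).map PySem.Str.strip).head? ≠ some "" := by
  induction t with
  | nil => simp
  | cons l u ih =>
    by_cases h : PySem.Str.strip l = ""
    · simpa [h] using ih
    · simp [h]

/-- Main bridge: B's run recursion on the stripped lines equals A's per-line loop. -/
lemma pvCollapseB_eq_pvG : ∀ (n : Nat) (ls : List String), ls.length ≤ n → ∀ b : Bool,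
    pvCollapseB (ls.map PySem.Str.strip) b = pvG b ls := by
  intro n
  induction n with
  | zero =>
    intro ls hls b
    have : ls = [] := List.length_eq_zero_iff.mp (Nat.le_zero.mp hls)
    subst this; simp [pvCollapseB, pvG]
  | succ n ih =>
    intro ls hls b
    cases ls with
    | nil => simp [pvCollapseB, pvG]
    | cons l t =>
      have ht : t.length ≤ n := by simpa using Nat.le_of_succ_le_succ hls
      by_cases h : PySem.Str.strip l = ""
      · rw [List.map_cons, h, pvCollapseB_cons_blank, pvSpanB_snd_map_strip]
        have hd : (t.dropWhile (fun l => PySem.Str.strip l == "")).length ≤ n :=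
          le_trans (List.length_dropWhile_le _ _) ht
        cases b with
        | true =>
          rw [ih _ hd true]
          simp [pvG, h, pvG_false_dropWhile]
        | false =>
          rw [pvCollapseB_flag _ (dropWhile_head_nonblank t), ih _ hd true]
          simp [pvG, h, pvG_false_dropWhile]
      · rw [List.map_cons, pvCollapseB_cons_nonblank _ _ h, ih _ ht true]
        simp [pvG, h]

-- ===== VERDICT (by name: the statement is the Claim_ definition above) =====
theorem clean_text_content_spec : Claim_equal_clean_text_content := by
  intro text _
  simp only [Spec_clean_text_content, clean_text_content, clean_text_content_alt]
  rw [foldlA_eq_pvG]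
  have hflag : ((([] : List String).getLast?.getD "" ≠ "") : Bool) = false := by simp
  rw [hflag, List.nil_append]
  set ls := (PySem.Str.split? text "\n").getD []
  rw [pvCollapseB_eq_pvG ls.length ls le_rfl false]
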